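-- pv_equiv track=rewrite | github.com/ProgKenhy/PythonAlgorithms | 4_KMP_search/main.py | naive_find
-- ===== SOURCE A (Python) =====
-- def naive_find(my_str: str, pattern:str) -> tuple[int, int]:
--     count = 0
--     proverok = 0
--     for i in range(len(my_str) - len(pattern) + 1):
--         flag = True
--         for j in range(len(pattern)):
--             proverok += 1
--             if my_str[i + j] != pattern[j]:
--                 flag = False
--                 break
--         if flag:
--             count += 1
--     return count, proverok
-- ===== SOURCE B (Python) =====
-- def _lcp(x, y):
--     k = 0
--     for a, b in zip(x, y):
--         if a != b:
--             break
--         k += 1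
--     return k
--
--
-- def naive_find(my_str: str, pattern: str) -> tuple[int, int]:
--     m = len(pattern)
--     lcps = [_lcp(my_str[i:], pattern) for i in range(len(my_str) - m + 1)]
--     count = sum(1 for L in lcps if L == m)
--     proverok = sum(m if L == m else L + 1 for L in lcps)
--     return count, proverok
-- ===== Notes on version B (the rewrite author's own statement) =====
-- stated objective: alternative
-- what changed: Replaces A's stateful increment-and-break inner loop inside a single accumulating outer loop by a two-phase decomposition: build the list of longest-common-prefix lengths for every alignment, then derive count and comparison cost by two aggregate sums using the closed formula (m comparisons on a match, L+1 on a mismatch).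
import Mathlib
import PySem

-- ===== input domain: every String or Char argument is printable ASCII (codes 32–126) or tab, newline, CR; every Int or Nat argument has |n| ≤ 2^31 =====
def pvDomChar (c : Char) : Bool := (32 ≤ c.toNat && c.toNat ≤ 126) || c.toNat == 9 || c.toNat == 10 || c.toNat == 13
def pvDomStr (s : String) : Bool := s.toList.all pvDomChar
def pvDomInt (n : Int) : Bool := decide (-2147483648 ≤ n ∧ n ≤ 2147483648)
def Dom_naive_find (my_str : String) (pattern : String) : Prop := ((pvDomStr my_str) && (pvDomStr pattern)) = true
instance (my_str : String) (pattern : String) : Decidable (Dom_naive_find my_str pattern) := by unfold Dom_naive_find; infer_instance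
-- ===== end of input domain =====

-- B replaces A's increment-and-break inner loop by a per-alignment longest-common-prefix list
-- followed by two aggregate sums (alternative decomposition, same cost).


-- ===== PORT A =====
-- inner 'for j in range(len(pattern))' loop with its break, threading proverok;
-- the pyGetD default ' ' is never consulted: every index taken is in range.
def naiveInner (s p : List Char) (i : Int) : Int → Nat → Int → Bool × Int
  | _j, 0, proverok => (true, proverok)
  | j, rem + 1, proverok =>
    let proverok := proverok + 1
    if PySem.List.pyGetD s (i + j) ' ' ≠ PySem.List.pyGetD p j ' ' then (false, proverok)
    else naiveInner s p i (j + 1) rem proverok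

def naive_find (my_str : String) (pattern : String) : Int × Int :=
  let s := my_str.toList
  let p := pattern.toList
  (PySem.List.pyRange 0 ((s.length : Int) - (p.length : Int) + 1) 1).foldl
    (fun (acc : Int × Int) i =>
      let r := naiveInner s p i 0 p.length acc.2
      if r.1 then (acc.1 + 1, r.2) else (acc.1, r.2))
    (0, 0)

-- ===== PORT B =====
-- _lcp: longest common prefix length of two char lists
def lcpChars : List Char → List Char → Nat
  | a :: as, b :: bs => if a = b then lcpChars as bs + 1 else 0
  | _, _ => 0

def naive_find_alt (my_str : String) (pattern : String) : Int × Int :=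
  let s := my_str.toList
  let p := pattern.toList
  let m := p.length
  let lcps := (PySem.List.pyRange 0 ((s.length : Int) - (m : Int) + 1) 1).map
      (fun i => lcpChars (PySem.List.slice s (some i) none) p)
  let count : Int := (lcps.countP (fun L => L == m) : Nat)
  let proverok : Int := (lcps.map (fun L => if L = m then (m : Int) else (L : Int) + 1)).sum
  (count, proverok)

-- ===== PRECONDITION & SPEC =====
def Spec_naive_find (my_str : String) (pattern : String) (out : Int × Int) : Prop := out = naive_find_alt my_str pattern
instance (my_str : String) (pattern : String) (out : Int × Int) : Decidable (Spec_naive_find my_str pattern out) := by unfold Spec_naive_find; infer_instance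

-- ===== CLAIM (what is proved, stated in full; the proofs are below) =====
def Claim_equal_naive_find : Prop := ∀ (my_str : String) (pattern : String), Dom_naive_find my_str pattern → Spec_naive_find my_str pattern (naive_find my_str pattern)

-- ===== LEMMAS AND PROOFS =====

lemma lcpChars_nil (x : List Char) : lcpChars x [] = 0 := by
  cases x <;> rfl

-- The inner loop of A measures the common prefix: full match ⇒ m comparisons, mismatch ⇒ L+1.
lemma inner_eq (s p : List Char) (i : Nat) :
    ∀ (rem j : Nat) (pr : Int), j + rem = p.length → i + p.length ≤ s.length →
      naiveInner s p (i : Int) (j : Int) rem pr =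
        (if lcpChars (s.drop (i + j)) (p.drop j) = rem
         then (true, pr + (rem : Int))
         else (false, pr + ((lcpChars (s.drop (i + j)) (p.drop j) : Nat) : Int) + 1)) := by
  intro rem
  induction rem with
  | zero =>
    intro j pr hj _
    have hpd : p.drop j = [] := List.drop_eq_nil_of_le (by omega)
    simp [naiveInner, hpd, lcpChars_nil]
  | succ rem ih =>
    intro j pr hj hlen
    have hjp : j < p.length := by omega
    have his : i + j < s.length := by omega
    have hsd : s.drop (i + j) = s[i + j] :: s.drop (i + j + 1) :=
      List.drop_eq_getElem_cons his
    have hpd : p.drop j = p[j] :: p.drop (j + 1) :=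
      List.drop_eq_getElem_cons hjp
    have hgs : PySem.List.pyGetD s ((i : Int) + (j : Int)) ' ' = s[i + j] := by
      have hij : (i : Int) + (j : Int) = ((i + j : Nat) : Int) := by push_cast; ring
      rw [hij, PySem.List.pyGetD_natCast, List.getD_eq_getElem s ' ' his]
    have hgp : PySem.List.pyGetD p ((j : Int)) ' ' = p[j] := by
      rw [PySem.List.pyGetD_natCast, List.getD_eq_getElem p ' ' hjp]
    have harith : i + j + 1 = i + (j + 1) := by omega
    by_cases hc : s[i + j] = p[j]
    · have hstep : ((j : Int) + 1) = ((j + 1 : Nat) : Int) := by push_cast; ring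
      have hrec := ih (j + 1) (pr + 1) (by omega) hlen
      rw [show naiveInner s p (i : Int) (j : Int) (rem + 1) pr
            = naiveInner s p (i : Int) ((j : Int) + 1) rem (pr + 1) from by
          simp [naiveInner, hgs, hgp, hc]]
      rw [hstep, hrec, hsd, hpd]
      simp only [lcpChars]
      rw [if_pos hc, harith]
      by_cases hLm : lcpChars (s.drop (i + (j + 1))) (p.drop (j + 1)) = rem
      · rw [if_pos hLm, if_pos (by omega : lcpChars (s.drop (i + (j + 1))) (p.drop (j + 1)) + 1 = rem + 1)]
        simp only [Prod.mk.injEq, true_and]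
        push_cast; ring
      · rw [if_neg hLm, if_neg (by omega : ¬ (lcpChars (s.drop (i + (j + 1))) (p.drop (j + 1)) + 1 = rem + 1))]
        simp only [Prod.mk.injEq, true_and]
        push_cast; ring
    · rw [show naiveInner s p (i : Int) (j : Int) (rem + 1) pr = (false, pr + 1) from by
          simp [naiveInner, hgs, hgp, hc]]
      rw [hsd, hpd]
      simp only [lcpChars]
      rw [if_neg hc, if_neg (by omega : ¬ ((0 : Nat) = rem + 1))]
      simp only [Prod.mk.injEq, true_and]
      push_cast; ring

-- One pass of A's outer fold equals B's two aggregate sums over the lcp list.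
lemma outer_eq (s p : List Char) :
    ∀ (idxs : List Int), (∀ x ∈ idxs, 0 ≤ x ∧ x.toNat + p.length ≤ s.length) →
    ∀ (c pr : Int),
      idxs.foldl
        (fun (acc : Int × Int) i =>
          let r := naiveInner s p i 0 p.length acc.2
          if r.1 then (acc.1 + 1, r.2) else (acc.1, r.2)) (c, pr)
      = (c + (((idxs.map (fun i => lcpChars (PySem.List.slice s (some i) none) p)).countP
                (fun L => L == p.length) : Nat) : Int),
         pr + ((idxs.map (fun i => lcpChars (PySem.List.slice s (some i) none) p)).map
                (fun L => if L = p.length then (p.length : Int) else (L : Int) + 1)).sum) := by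
  intro idxs
  induction idxs with
  | nil => intro _ c pr; simp
  | cons i rest ih =>
    intro hmem c pr
    obtain ⟨hi0, hilen⟩ := hmem i List.mem_cons_self
    have hcast : i = ((i.toNat : Nat) : Int) := by omega
    have hslice : PySem.List.slice s (some i) none = s.drop i.toNat :=
      PySem.List.slice_from s hi0
    have hinner := inner_eq s p i.toNat p.length 0 pr (by omega) hilen
    simp only [Nat.add_zero, Nat.cast_zero, List.drop_zero] at hinner
    rw [← hcast] at hinner
    have hrest := ih (fun x hx => hmem x (List.mem_cons_of_mem _ hx))
    rw [List.foldl_cons]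
    simp only
    rw [hinner]
    by_cases hm : lcpChars (s.drop i.toNat) p = p.length
    · rw [if_pos hm]
      rw [show (if (true, pr + (p.length : Int)).1 = true
              then (c + 1, (true, pr + (p.length : Int)).2)
              else (c, (true, pr + (p.length : Int)).2)) = (c + 1, pr + (p.length : Int)) from rfl]
      rw [hrest (c + 1) (pr + (p.length : Int))]
      simp only [List.map_cons, List.countP_cons, List.sum_cons, hslice, hm]
      simp [Prod.ext_iff]
      all_goals omega
    · rw [if_neg hm]
      rw [show (if (false, pr + ((lcpChars (s.drop i.toNat) p : Nat) : Int) + 1).1 = true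
              then (c + 1, (false, pr + ((lcpChars (s.drop i.toNat) p : Nat) : Int) + 1).2)
              else (c, (false, pr + ((lcpChars (s.drop i.toNat) p : Nat) : Int) + 1).2))
            = (c, pr + ((lcpChars (s.drop i.toNat) p : Nat) : Int) + 1) from rfl]
      rw [hrest c (pr + ((lcpChars (s.drop i.toNat) p : Nat) : Int) + 1)]
      simp only [List.map_cons, List.countP_cons, List.sum_cons, hslice]
      simp [Prod.ext_iff, hm]
      all_goals omega

-- ===== VERDICT (by name: the statement is the Claim_ definition above) =====
theorem naive_find_spec : Claim_equal_naive_find := by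
  intro my_str pattern _
  unfold Spec_naive_find naive_find naive_find_alt
  set s := my_str.toList
  set p := pattern.toList
  have hmem : ∀ x ∈ PySem.List.pyRange 0 ((s.length : Int) - (p.length : Int) + 1) 1,
      0 ≤ x ∧ x.toNat + p.length ≤ s.length := by
    intro x hx
    rw [PySem.List.mem_pyRange_one] at hx
    omega
  rw [outer_eq s p _ hmem 0 0]
  simp
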